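-- pv_equiv track=rewrite | github.com/Ramziia/UnitTestTeapotAnimation | draw_file/Color.py | barycentric
-- ===== SOURCE A (Python) =====
-- def barycentric(xy, points):
--     # Находим максимальные и минимальные значение x и y среди трех вершин
--     maxx = max(xy[0][points[0]], xy[0][points[1]], xy[0][points[2]])
--     maxy = max(xy[1][points[0]], xy[1][points[1]], xy[1][points[2]])
--     minx = min(xy[0][points[0]], xy[0][points[1]], xy[0][points[2]])
--     miny = min(xy[1][points[0]], xy[1][points[1]], xy[1][points[2]])
--     # Проходимся по прямоугольнику, в котором находится треугольник
--     for x in range(minx, maxx + 1):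
--         for y in range(miny, maxy + 1):
--             a = (xy[0][points[0]] - x) * (xy[1][points[1]] - xy[1][points[0]]) - (xy[0][points[1]] - xy[0][points[0]]) * (xy[1][points[0]] - y)
--             b = (xy[0][points[1]] - x) * (xy[1][points[2]] - xy[1][points[1]]) - (xy[0][points[2]] - xy[0][points[1]]) * (xy[1][points[1]] - y)
--             c = (xy[0][points[2]] - x) * (xy[1][points[0]] - xy[1][points[2]]) - (xy[0][points[0]] - xy[0][points[2]]) * (xy[1][points[2]] - y)
--             # Условие принадлежности треугольнику
--             if a >= 0 and b >= 0 and c >= 0: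
--                 xy[0].append(x)
--                 xy[1].append(y)
--     return xy
-- ===== SOURCE B (Python) =====
-- def barycentric(xy, points):
--     # B: per-column interval rasterization — each edge function is linear in y,
--     # so solve the three half-plane inequalities for y instead of testing every pixel.
--     # Mutates xy[0]/xy[1] in place (same side effect as A) and returns xy.
--     x0, x1, x2 = xy[0][points[0]], xy[0][points[1]], xy[0][points[2]]
--     y0, y1, y2 = xy[1][points[0]], xy[1][points[1]], xy[1][points[2]]
--     minx, maxx = min(x0, x1, x2), max(x0, x1, x2)
--     miny, maxy = min(y0, y1, y2), max(y0, y1, y2)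
--     for x in range(minx, maxx + 1):
--         lo, hi, ok = miny, maxy, True
--         sa = x1 - x0
--         ca = (x0 - x) * (y1 - y0) - sa * y0
--         if sa > 0:
--             lo = max(lo, -(ca // sa))
--         elif sa < 0:
--             hi = min(hi, (-ca) // sa)
--         elif ca < 0:
--             ok = False
--         sb = x2 - x1
--         cb = (x1 - x) * (y2 - y1) - sb * y1
--         if sb > 0:
--             lo = max(lo, -(cb // sb))
--         elif sb < 0:
--             hi = min(hi, (-cb) // sb)
--         elif cb < 0:
--             ok = False
--         sc = x0 - x2
--         cc = (x2 - x) * (y0 - y2) - sc * y2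
--         if sc > 0:
--             lo = max(lo, -(cc // sc))
--         elif sc < 0:
--             hi = min(hi, (-cc) // sc)
--         elif cc < 0:
--             ok = False
--         if ok:
--             for y in range(lo, hi + 1):
--                 xy[0].append(x)
--                 xy[1].append(y)
--     return xy
-- ===== Notes on version B (the rewrite author's own statement) =====
-- stated objective: alternative
-- what changed: Instead of testing every pixel of the bounding box with three edge functions, B solves, per column x, the three linear-in-y edge inequalities in closed form (ceil/floor bounds chosen by the slope sign) and appends exactly the resulting y-interval, removing the inner per-pixel scan (asymptotically better, but a timing run could not measure it on generated inputs).
import Mathlib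
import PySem

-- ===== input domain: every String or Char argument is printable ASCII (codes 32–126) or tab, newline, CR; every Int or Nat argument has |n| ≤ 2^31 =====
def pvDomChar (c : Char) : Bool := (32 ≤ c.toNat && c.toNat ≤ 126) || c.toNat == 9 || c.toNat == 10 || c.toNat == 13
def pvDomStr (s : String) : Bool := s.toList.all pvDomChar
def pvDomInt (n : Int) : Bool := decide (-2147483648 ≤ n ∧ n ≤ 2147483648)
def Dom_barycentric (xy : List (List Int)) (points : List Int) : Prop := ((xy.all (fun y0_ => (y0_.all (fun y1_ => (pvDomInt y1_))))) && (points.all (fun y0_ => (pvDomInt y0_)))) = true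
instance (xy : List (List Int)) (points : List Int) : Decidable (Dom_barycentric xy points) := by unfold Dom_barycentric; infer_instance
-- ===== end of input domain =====

-- B rasterizes each column by solving the three linear edge inequalities for y in closed
-- form instead of testing every pixel of the bounding box. In Python both versions append
-- to xy's first two rows in place; the equivalence proved here is about the returned value.

-- ===== PORT A =====
-- inner-loop body of A: reads the CURRENT (growing) rows at each pixel, as the Python does
def aInner (p0 p1 p2 x : Int) (s : List Int × List Int) (y : Int) : List Int × List Int :=
  let a := (PySem.List.pyGetD s.1 p0 0 - x) * (PySem.List.pyGetD s.2 p1 0 - PySem.List.pyGetD s.2 p0 0)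
           - (PySem.List.pyGetD s.1 p1 0 - PySem.List.pyGetD s.1 p0 0) * (PySem.List.pyGetD s.2 p0 0 - y)
  let b := (PySem.List.pyGetD s.1 p1 0 - x) * (PySem.List.pyGetD s.2 p2 0 - PySem.List.pyGetD s.2 p1 0)
           - (PySem.List.pyGetD s.1 p2 0 - PySem.List.pyGetD s.1 p1 0) * (PySem.List.pyGetD s.2 p1 0 - y)
  let c := (PySem.List.pyGetD s.1 p2 0 - x) * (PySem.List.pyGetD s.2 p0 0 - PySem.List.pyGetD s.2 p2 0)
           - (PySem.List.pyGetD s.1 p0 0 - PySem.List.pyGetD s.1 p2 0) * (PySem.List.pyGetD s.2 p2 0 - y)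
  if a ≥ 0 ∧ b ≥ 0 ∧ c ≥ 0 then (s.1 ++ [x], s.2 ++ [y]) else s

def barycentric (xy : List (List Int)) (points : List Int) : List (List Int) :=
  let p0 := PySem.List.pyGetD points 0 0
  let p1 := PySem.List.pyGetD points 1 0
  let p2 := PySem.List.pyGetD points 2 0
  let r0 := PySem.List.pyGetD xy 0 []
  let r1 := PySem.List.pyGetD xy 1 []
  let maxx := max (max (PySem.List.pyGetD r0 p0 0) (PySem.List.pyGetD r0 p1 0)) (PySem.List.pyGetD r0 p2 0)
  let maxy := max (max (PySem.List.pyGetD r1 p0 0) (PySem.List.pyGetD r1 p1 0)) (PySem.List.pyGetD r1 p2 0)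
  let minx := min (min (PySem.List.pyGetD r0 p0 0) (PySem.List.pyGetD r0 p1 0)) (PySem.List.pyGetD r0 p2 0)
  let miny := min (min (PySem.List.pyGetD r1 p0 0) (PySem.List.pyGetD r1 p1 0)) (PySem.List.pyGetD r1 p2 0)
  let res := (PySem.List.pyRange minx (maxx + 1) 1).foldl
      (fun s x => (PySem.List.pyRange miny (maxy + 1) 1).foldl (aInner p0 p1 p2 x) s) (r0, r1)
  PySem.List.pySetD (PySem.List.pySetD xy 0 res.1) 1 res.2

-- ===== PORT B =====
-- one if/elif/elif block of B: fold one edge constraint s*y + c >= 0 into (lo, hi, ok)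
def bEdge (s c : Int) (lho : Int × Int × Bool) : Int × Int × Bool :=
  if s > 0 then (max lho.1 (-(PySem.Int.floordiv c s)), lho.2.1, lho.2.2)
  else if s < 0 then (lho.1, min lho.2.1 (PySem.Int.floordiv (-c) s), lho.2.2)
  else if c < 0 then (lho.1, lho.2.1, false)
  else lho

-- one iteration of B's column loop
def bCol (X0 X1 X2 Y0 Y1 Y2 miny maxy : Int) (st : List Int × List Int) (x : Int) : List Int × List Int :=
  let e1 := bEdge (X1 - X0) ((X0 - x) * (Y1 - Y0) - (X1 - X0) * Y0) (miny, maxy, true)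
  let e2 := bEdge (X2 - X1) ((X1 - x) * (Y2 - Y1) - (X2 - X1) * Y1) e1
  let e3 := bEdge (X0 - X2) ((X2 - x) * (Y0 - Y2) - (X0 - X2) * Y2) e2
  if e3.2.2 then
    (PySem.List.pyRange e3.1 (e3.2.1 + 1) 1).foldl (fun s y => (s.1 ++ [x], s.2 ++ [y])) st
  else st

def barycentric_alt (xy : List (List Int)) (points : List Int) : List (List Int) :=
  let r0 := PySem.List.pyGetD xy 0 []
  let r1 := PySem.List.pyGetD xy 1 []
  let X0 := PySem.List.pyGetD r0 (PySem.List.pyGetD points 0 0) 0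
  let X1 := PySem.List.pyGetD r0 (PySem.List.pyGetD points 1 0) 0
  let X2 := PySem.List.pyGetD r0 (PySem.List.pyGetD points 2 0) 0
  let Y0 := PySem.List.pyGetD r1 (PySem.List.pyGetD points 0 0) 0
  let Y1 := PySem.List.pyGetD r1 (PySem.List.pyGetD points 1 0) 0
  let Y2 := PySem.List.pyGetD r1 (PySem.List.pyGetD points 2 0) 0
  let minx := min (min X0 X1) X2
  let maxx := max (max X0 X1) X2
  let miny := min (min Y0 Y1) Y2
  let maxy := max (max Y0 Y1) Y2
  let res := (PySem.List.pyRange minx (maxx + 1) 1).foldl (bCol X0 X1 X2 Y0 Y1 Y2 miny maxy) (r0, r1)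
  PySem.List.pySetD (PySem.List.pySetD xy 0 res.1) 1 res.2

-- ===== PRECONDITION & SPEC =====
-- Pre_ excludes inputs where A raises IndexError (fewer than 2 rows, fewer than 3 point
-- indices, or a vertex index out of range), and inputs that combine a NEGATIVE in-range
-- vertex index with a triangle that is not strictly clockwise (cross ≥ 0): there A emits at
-- least one pixel and then re-resolves the negative index against the rows it has already
-- appended to, so its remaining vertex reads drift with its own partial output — an accident
-- of mutating while reading that no caller could rely on; B reads the three vertices once.
-- Negative indices stay inside Pre_ when nothing can drift: a strictly clockwise triangle
-- (nothing is emitted) or three coinciding vertices (one pixel is emitted, then the loop ends).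
def Pre_barycentric (xy : List (List Int)) (points : List Int) : Prop :=
  2 ≤ xy.length ∧ 3 ≤ points.length ∧
  (∀ p ∈ [points.getD 0 0, points.getD 1 0, points.getD 2 0],
    -((xy.getD 0 []).length : Int) ≤ p ∧ p < ((xy.getD 0 []).length : Int)
    ∧ -((xy.getD 1 []).length : Int) ≤ p ∧ p < ((xy.getD 1 []).length : Int)) ∧
  ((0 ≤ points.getD 0 0 ∧ 0 ≤ points.getD 1 0 ∧ 0 ≤ points.getD 2 0) ∨
    (PySem.List.pyGetD (xy.getD 0 []) (points.getD 1 0) 0 = PySem.List.pyGetD (xy.getD 0 []) (points.getD 0 0) 0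
      ∧ PySem.List.pyGetD (xy.getD 0 []) (points.getD 2 0) 0 = PySem.List.pyGetD (xy.getD 0 []) (points.getD 0 0) 0
      ∧ PySem.List.pyGetD (xy.getD 1 []) (points.getD 1 0) 0 = PySem.List.pyGetD (xy.getD 1 []) (points.getD 0 0) 0
      ∧ PySem.List.pyGetD (xy.getD 1 []) (points.getD 2 0) 0 = PySem.List.pyGetD (xy.getD 1 []) (points.getD 0 0) 0) ∨
    (PySem.List.pyGetD (xy.getD 0 []) (points.getD 1 0) 0 - PySem.List.pyGetD (xy.getD 0 []) (points.getD 0 0) 0)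
      * (PySem.List.pyGetD (xy.getD 1 []) (points.getD 2 0) 0 - PySem.List.pyGetD (xy.getD 1 []) (points.getD 0 0) 0)
    - (PySem.List.pyGetD (xy.getD 0 []) (points.getD 2 0) 0 - PySem.List.pyGetD (xy.getD 0 []) (points.getD 0 0) 0)
      * (PySem.List.pyGetD (xy.getD 1 []) (points.getD 1 0) 0 - PySem.List.pyGetD (xy.getD 1 []) (points.getD 0 0) 0) < 0)
instance (xy : List (List Int)) (points : List Int) : Decidable (Pre_barycentric xy points) := by
  unfold Pre_barycentric; infer_instance

def pvWitness_barycentric : List (List Int) × List Int := ([[0, 2, 0], [0, 0, 2]], [0, 1, 2])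

def Spec_barycentric (xy : List (List Int)) (points : List Int) (out : List (List Int)) : Prop := out = barycentric_alt xy points
instance (xy : List (List Int)) (points : List Int) (out : List (List Int)) : Decidable (Spec_barycentric xy points out) := by unfold Spec_barycentric; infer_instance

-- ===== CLAIM (what is proved, stated in full; the proofs are below) =====
def Claim_equal_barycentric : Prop := ∀ (xy : List (List Int)) (points : List Int), Dom_barycentric xy points → Pre_barycentric xy points → Spec_barycentric xy points (barycentric xy points)

-- ===== LEMMAS AND PROOFS =====

theorem ceil_le (s c y : Int) (hs : 0 < s) :
    (-(PySem.Int.floordiv c s) ≤ y) ↔ 0 ≤ s * y + c := by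
  rw [neg_le, PySem.Int.le_floordiv_iff_mul_le hs]
  constructor <;> intro h <;> nlinarith

theorem floor_le (s c y : Int) (hs : s < 0) :
    (y ≤ PySem.Int.floordiv (-c) s) ↔ 0 ≤ s * y + c := by
  have h2 : PySem.Int.floordiv (-c) s = PySem.Int.floordiv c (-s) := by
    rw [← PySem.Int.floordiv_neg_neg c (-s), neg_neg]
  rw [h2, PySem.Int.le_floordiv_iff_mul_le (by omega)]
  constructor <;> intro h <;> nlinarith

-- what one bEdge step means: the new (lo, hi, ok) interval is the old one cut by s*y + c ≥ 0
theorem bEdge_char (s c : Int) (lho : Int × Int × Bool) (y : Int) :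
    ((bEdge s c lho).2.2 = true ∧ (bEdge s c lho).1 ≤ y ∧ y ≤ (bEdge s c lho).2.1)
    ↔ (lho.2.2 = true ∧ lho.1 ≤ y ∧ y ≤ lho.2.1 ∧ 0 ≤ s * y + c) := by
  unfold bEdge
  split_ifs with h1 h2 h3
  · simp only [max_le_iff, ceil_le s c y h1]; tauto
  · simp only [le_min_iff, floor_le s c y h2]; try tauto
  · have hs : s = 0 := by omega
    subst hs
    constructor
    · intro h; simp at h
    · intro h
      have hc := h.2.2.2
      simp at hc
      omega
  · have hs : s = 0 := by omega
    subst hs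
    constructor
    · intro h; refine ⟨h.1, h.2.1, h.2.2, by simp; omega⟩
    · intro h; exact ⟨h.1, h.2.1, h.2.2.1⟩

theorem bEdge_bounds (s c : Int) (lho : Int × Int × Bool) :
    lho.1 ≤ (bEdge s c lho).1 ∧ (bEdge s c lho).2.1 ≤ lho.2.1 := by
  unfold bEdge; split_ifs <;> simp

-- filtering an integer range by an interval predicate yields a subrange
theorem filter_pyRange_interval (p : Int → Bool) (b L H : Int)
    (hp : ∀ y, p y = true ↔ (L ≤ y ∧ y ≤ H)) :
    ∀ (n : Nat) (a : Int), (b - a).toNat = n →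
    (PySem.List.pyRange a b 1).filter p = PySem.List.pyRange (max a L) (min b (H + 1)) 1 := by
  intro n
  induction n with
  | zero =>
    intro a ha
    have h1 : b ≤ a := by omega
    have h2 : min b (H + 1) ≤ max a L := by
      have := le_max_left a L
      have := min_le_left b (H + 1)
      omega
    rw [PySem.List.pyRange_one_eq_nil h1, PySem.List.pyRange_one_eq_nil h2]
    simp
  | succ m ih =>
    intro a ha
    rw [PySem.List.pyRange_one_cons (by omega), List.filter_cons]
    by_cases hpa : p a = true
    · have hLa := (hp a).mp hpa
      have hmax : max a L = a := by omega
      have hmax2 : max (a + 1) L = a + 1 := by omega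
      rw [hpa, if_pos rfl]
      conv_rhs => rw [hmax, PySem.List.pyRange_one_cons (by omega : a < min b (H + 1))]
      rw [ih (a + 1) (by omega), hmax2]
    · rw [Bool.not_eq_true] at hpa
      rw [hpa]
      simp only [Bool.false_eq_true, if_false]
      rw [ih (a + 1) (by omega)]
      have hna : ¬ (L ≤ a ∧ a ≤ H) := fun h => by simp [(hp a).mpr h] at hpa
      by_cases hL : L ≤ a
      · have hH : H < a := by by_contra h; exact hna ⟨hL, by omega⟩
        have e1 : min b (H + 1) ≤ max (a + 1) L := by
          have := le_max_left (a + 1) L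
          have := min_le_right b (H + 1)
          omega
        have e2 : min b (H + 1) ≤ max a L := by
          have := le_max_left a L
          have := min_le_right b (H + 1)
          omega
        rw [PySem.List.pyRange_one_eq_nil e1, PySem.List.pyRange_one_eq_nil e2]
      · rw [show max (a + 1) L = max a L by omega]

-- B's unconditional per-column append loop, in closed form
theorem pairAppendFold (L : List Int) (x : Int) : ∀ (st : List Int × List Int),
    L.foldl (fun (s : List Int × List Int) y => (s.1 ++ [x], s.2 ++ [y])) st
    = (st.1 ++ L.map (fun _ => x), st.2 ++ L) := by
  induction L with
  | nil => intro st; simp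
  | cons y t ih => intro st; simp [ih, List.append_assoc]

-- the list of y's B emits for one column
def colList (X0 X1 X2 Y0 Y1 Y2 miny maxy x : Int) : List Int :=
  let e1 := bEdge (X1 - X0) ((X0 - x) * (Y1 - Y0) - (X1 - X0) * Y0) (miny, maxy, true)
  let e2 := bEdge (X2 - X1) ((X1 - x) * (Y2 - Y1) - (X2 - X1) * Y1) e1
  let e3 := bEdge (X0 - X2) ((X2 - x) * (Y0 - Y2) - (X0 - X2) * Y2) e2
  if e3.2.2 then PySem.List.pyRange e3.1 (e3.2.1 + 1) 1 else []

theorem bCol_eq (X0 X1 X2 Y0 Y1 Y2 miny maxy x : Int) (st : List Int × List Int) :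
    bCol X0 X1 X2 Y0 Y1 Y2 miny maxy st x
    = (st.1 ++ (colList X0 X1 X2 Y0 Y1 Y2 miny maxy x).map (fun _ => x),
       st.2 ++ colList X0 X1 X2 Y0 Y1 Y2 miny maxy x) := by
  simp only [bCol, colList]
  split_ifs with h
  · rw [pairAppendFold]
  · simp

-- A's filtered column equals B's interval column
theorem filter_eq_colList (x₀ X0 X1 X2 Y0 Y1 Y2 : Int) (p : Int → Bool)
    (hp : ∀ y, p y = true ↔ ((X0 - x₀) * (Y1 - Y0) - (X1 - X0) * (Y0 - y) ≥ 0
        ∧ (X1 - x₀) * (Y2 - Y1) - (X2 - X1) * (Y1 - y) ≥ 0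
        ∧ (X2 - x₀) * (Y0 - Y2) - (X0 - X2) * (Y2 - y) ≥ 0))
    (miny maxy : Int) :
    (PySem.List.pyRange miny (maxy + 1) 1).filter p
    = colList X0 X1 X2 Y0 Y1 Y2 miny maxy x₀ := by
  set x := x₀
  set e1 := bEdge (X1 - X0) ((X0 - x) * (Y1 - Y0) - (X1 - X0) * Y0) (miny, maxy, true) with he1
  set e2 := bEdge (X2 - X1) ((X1 - x) * (Y2 - Y1) - (X2 - X1) * Y1) e1 with he2
  set e3 := bEdge (X0 - X2) ((X2 - x) * (Y0 - Y2) - (X0 - X2) * Y2) e2 with he3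
  have hchar : ∀ y : Int,
      (e3.2.2 = true ∧ e3.1 ≤ y ∧ y ≤ e3.2.1)
      ↔ (miny ≤ y ∧ y ≤ maxy
         ∧ (X0 - x) * (Y1 - Y0) - (X1 - X0) * (Y0 - y) ≥ 0
         ∧ (X1 - x) * (Y2 - Y1) - (X2 - X1) * (Y1 - y) ≥ 0
         ∧ (X2 - x) * (Y0 - Y2) - (X0 - X2) * (Y2 - y) ≥ 0) := by
    intro y
    have c3 := bEdge_char (X0 - X2) ((X2 - x) * (Y0 - Y2) - (X0 - X2) * Y2) e2 y
    have c2 := bEdge_char (X2 - X1) ((X1 - x) * (Y2 - Y1) - (X2 - X1) * Y1) e1 y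
    have c1 := bEdge_char (X1 - X0) ((X0 - x) * (Y1 - Y0) - (X1 - X0) * Y0) (miny, maxy, true) y
    rw [show (X1 - X0) * y + ((X0 - x) * (Y1 - Y0) - (X1 - X0) * Y0)
        = (X0 - x) * (Y1 - Y0) - (X1 - X0) * (Y0 - y) from by ring] at c1
    rw [show (X2 - X1) * y + ((X1 - x) * (Y2 - Y1) - (X2 - X1) * Y1)
        = (X1 - x) * (Y2 - Y1) - (X2 - X1) * (Y1 - y) from by ring] at c2
    rw [show (X0 - X2) * y + ((X2 - x) * (Y0 - Y2) - (X0 - X2) * Y2)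
        = (X2 - x) * (Y0 - Y2) - (X0 - X2) * (Y2 - y) from by ring] at c3
    simp only [← he1] at c1 c2
    simp only [← he2] at c2 c3
    simp only [← he3] at c3
    simp only [ge_iff_le] at c1 c2 c3 ⊢
    constructor
    · intro h
      have r3 := c3.mp h
      have r2 := c2.mp ⟨r3.1, r3.2.1, r3.2.2.1⟩
      have r1 := c1.mp ⟨r2.1, r2.2.1, r2.2.2.1⟩
      exact ⟨r1.2.1, r1.2.2.1, r1.2.2.2, r2.2.2.2, r3.2.2.2⟩
    · intro h
      have r1 := c1.mpr ⟨by trivial, h.1, h.2.1, h.2.2.1⟩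
      have r2 := c2.mpr ⟨r1.1, r1.2.1, r1.2.2, h.2.2.2.1⟩
      exact c3.mpr ⟨r2.1, r2.2.1, r2.2.2, h.2.2.2.2⟩
  have hb1 := bEdge_bounds (X1 - X0) ((X0 - x) * (Y1 - Y0) - (X1 - X0) * Y0) (miny, maxy, true)
  have hb2 := bEdge_bounds (X2 - X1) ((X1 - x) * (Y2 - Y1) - (X2 - X1) * Y1) e1
  have hb3 := bEdge_bounds (X0 - X2) ((X2 - x) * (Y0 - Y2) - (X0 - X2) * Y2) e2
  simp only [← he1] at hb1
  simp only [← he2] at hb2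
  simp only [← he3] at hb3
  have hlo : miny ≤ e3.1 := le_trans (le_trans hb1.1 hb2.1) hb3.1
  have hhi : e3.2.1 ≤ maxy := le_trans hb3.2 (le_trans hb2.2 hb1.2)
  have hcongr : (PySem.List.pyRange miny (maxy + 1) 1).filter p
      = (PySem.List.pyRange miny (maxy + 1) 1).filter
          (fun y => decide (e3.2.2 = true ∧ e3.1 ≤ y ∧ y ≤ e3.2.1)) := by
    apply List.filter_congr
    intro y hy
    rw [PySem.List.mem_pyRange_one] at hy
    rw [Bool.eq_iff_iff]
    simp only [decide_eq_true_eq]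
    rw [hp y, hchar y]
    constructor
    · intro h; exact ⟨by omega, by omega, h⟩
    · intro h; exact h.2.2
  rw [hcongr]
  simp only [colList]
  simp only [← he1, ← he2, ← he3]
  by_cases hok : e3.2.2 = true
  · rw [if_pos hok]
    rw [filter_pyRange_interval _ _ e3.1 e3.2.1
        (by intro y; simp only [decide_eq_true_eq, hok]; tauto)
        (maxy + 1 - miny).toNat miny rfl]
    rw [show max miny e3.1 = e3.1 from by omega,
        show min (maxy + 1) (e3.2.1 + 1) = e3.2.1 + 1 from by omega]
  · rw [if_neg hok]
    apply List.filter_eq_nil_iff.mpr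
    intro y hy
    simp [hok]

-- appending to a row does not change a read at a fixed in-range non-negative index
theorem read_stable (r ext : List Int) (p : Int) (h0 : 0 ≤ p) (h1 : p < (r.length : Int)) :
    PySem.List.pyGetD (r ++ ext) p 0 = PySem.List.pyGetD r p 0 := by
  rw [PySem.List.pyGetD_eq_getElem _ _ h0 (by simp; omega),
      PySem.List.pyGetD_eq_getElem _ _ h0 h1,
      List.getElem_append_left (by omega)]

-- the per-pixel inside-triangle test of A, with the vertex reads resolved to the fixed rows
def pxCond (r0 r1 : List Int) (p0 p1 p2 x y : Int) : Bool :=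
  decide ((PySem.List.pyGetD r0 p0 0 - x) * (PySem.List.pyGetD r1 p1 0 - PySem.List.pyGetD r1 p0 0)
            - (PySem.List.pyGetD r0 p1 0 - PySem.List.pyGetD r0 p0 0) * (PySem.List.pyGetD r1 p0 0 - y) ≥ 0
        ∧ (PySem.List.pyGetD r0 p1 0 - x) * (PySem.List.pyGetD r1 p2 0 - PySem.List.pyGetD r1 p1 0)
            - (PySem.List.pyGetD r0 p2 0 - PySem.List.pyGetD r0 p1 0) * (PySem.List.pyGetD r1 p1 0 - y) ≥ 0
        ∧ (PySem.List.pyGetD r0 p2 0 - x) * (PySem.List.pyGetD r1 p0 0 - PySem.List.pyGetD r1 p2 0)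
            - (PySem.List.pyGetD r0 p0 0 - PySem.List.pyGetD r0 p2 0) * (PySem.List.pyGetD r1 p2 0 - y) ≥ 0)

-- A's inner loop: the reads are stable under the appends, so it filters the y-range
theorem aInner_fold (r0 r1 : List Int) (p0 p1 p2 : Int)
    (h0 : 0 ≤ p0) (h0a : p0 < (r0.length : Int)) (h0b : p0 < (r1.length : Int))
    (h1 : 0 ≤ p1) (h1a : p1 < (r0.length : Int)) (h1b : p1 < (r1.length : Int))
    (h2 : 0 ≤ p2) (h2a : p2 < (r0.length : Int)) (h2b : p2 < (r1.length : Int))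
    (x : Int) (L : List Int) :
    ∀ (e0 e1 : List Int),
    L.foldl (aInner p0 p1 p2 x) (r0 ++ e0, r1 ++ e1)
    = (r0 ++ e0 ++ (L.filter (pxCond r0 r1 p0 p1 p2 x)).map (fun _ => x),
       r1 ++ e1 ++ L.filter (pxCond r0 r1 p0 p1 p2 x)) := by
  induction L with
  | nil => intro e0 e1; simp
  | cons y t ih =>
    intro e0 e1
    have hstep : aInner p0 p1 p2 x (r0 ++ e0, r1 ++ e1) y
        = if pxCond r0 r1 p0 p1 p2 x y then (r0 ++ (e0 ++ [x]), r1 ++ (e1 ++ [y]))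
          else (r0 ++ e0, r1 ++ e1) := by
      simp only [aInner, pxCond,
        read_stable r0 e0 p0 h0 h0a, read_stable r1 e1 p0 h0 h0b,
        read_stable r0 e0 p1 h1 h1a, read_stable r1 e1 p1 h1 h1b,
        read_stable r0 e0 p2 h2 h2a, read_stable r1 e1 p2 h2 h2b,
        decide_eq_true_eq, List.append_assoc]
    rw [List.foldl_cons, hstep, List.filter_cons]
    by_cases hc : pxCond r0 r1 p0 p1 p2 x y = true
    · rw [if_pos hc, ih (e0 ++ [x]) (e1 ++ [y]), hc, if_pos rfl]
      simp [List.append_assoc]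
    · rw [if_neg hc, ih e0 e1]
      rw [Bool.not_eq_true] at hc
      rw [hc]
      simp only [Bool.false_eq_true, if_false]

-- the two column loops agree, by induction on the columns
theorem outer_eq (r0 r1 : List Int) (p0 p1 p2 : Int)
    (h0 : 0 ≤ p0) (h0a : p0 < (r0.length : Int)) (h0b : p0 < (r1.length : Int))
    (h1 : 0 ≤ p1) (h1a : p1 < (r0.length : Int)) (h1b : p1 < (r1.length : Int))
    (h2 : 0 ≤ p2) (h2a : p2 < (r0.length : Int)) (h2b : p2 < (r1.length : Int))
    (miny maxy : Int) (Lx : List Int) :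
    ∀ (e0 e1 : List Int),
    Lx.foldl (fun s x => (PySem.List.pyRange miny (maxy + 1) 1).foldl (aInner p0 p1 p2 x) s)
        (r0 ++ e0, r1 ++ e1)
    = Lx.foldl (bCol (PySem.List.pyGetD r0 p0 0) (PySem.List.pyGetD r0 p1 0) (PySem.List.pyGetD r0 p2 0)
        (PySem.List.pyGetD r1 p0 0) (PySem.List.pyGetD r1 p1 0) (PySem.List.pyGetD r1 p2 0)
        miny maxy) (r0 ++ e0, r1 ++ e1) := by
  induction Lx with
  | nil => intro e0 e1; rfl
  | cons x t ih =>
    intro e0 e1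
    have hfilter := filter_eq_colList x (PySem.List.pyGetD r0 p0 0) (PySem.List.pyGetD r0 p1 0)
      (PySem.List.pyGetD r0 p2 0) (PySem.List.pyGetD r1 p0 0) (PySem.List.pyGetD r1 p1 0)
      (PySem.List.pyGetD r1 p2 0) (pxCond r0 r1 p0 p1 p2 x)
      (by intro y; simp only [pxCond, decide_eq_true_eq]) miny maxy
    rw [List.foldl_cons, List.foldl_cons,
        aInner_fold r0 r1 p0 p1 p2 h0 h0a h0b h1 h1a h1b h2 h2a h2b x _ e0 e1,
        bCol_eq, hfilter]
    have htail := ih (e0 ++ (colList (PySem.List.pyGetD r0 p0 0) (PySem.List.pyGetD r0 p1 0)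
        (PySem.List.pyGetD r0 p2 0) (PySem.List.pyGetD r1 p0 0) (PySem.List.pyGetD r1 p1 0)
        (PySem.List.pyGetD r1 p2 0) miny maxy x).map (fun _ => x))
      (e1 ++ colList (PySem.List.pyGetD r0 p0 0) (PySem.List.pyGetD r0 p1 0)
        (PySem.List.pyGetD r0 p2 0) (PySem.List.pyGetD r1 p0 0) (PySem.List.pyGetD r1 p1 0)
        (PySem.List.pyGetD r1 p2 0) miny maxy x)
    simpa [List.append_assoc] using htail

-- a fold whose step fixes the start state is a no-op
theorem foldl_fix {α β : Type} (f : α → β → α) (s : α) (L : List β)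
    (h : ∀ y ∈ L, f s y = s) : L.foldl f s = s := by
  induction L with
  | nil => rfl
  | cons y t ih => rw [List.foldl_cons, h y (by simp)]; exact ih (fun z hz => h z (by simp [hz]))

-- for a strictly clockwise triangle no pixel passes: the three edge values sum to cross < 0
theorem colList_nil (x X0 X1 X2 Y0 Y1 Y2 miny maxy : Int)
    (hcross : (X1 - X0) * (Y2 - Y0) - (X2 - X0) * (Y1 - Y0) < 0) :
    colList X0 X1 X2 Y0 Y1 Y2 miny maxy x = [] := by
  rw [← filter_eq_colList x X0 X1 X2 Y0 Y1 Y2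
      (fun y => decide ((X0 - x) * (Y1 - Y0) - (X1 - X0) * (Y0 - y) ≥ 0
        ∧ (X1 - x) * (Y2 - Y1) - (X2 - X1) * (Y1 - y) ≥ 0
        ∧ (X2 - x) * (Y0 - Y2) - (X0 - X2) * (Y2 - y) ≥ 0))
      (by intro y; simp only [decide_eq_true_eq]) miny maxy]
  apply List.filter_eq_nil_iff.mpr
  intro y _
  simp only [decide_eq_true_eq]
  rintro ⟨ha, hb, hc⟩
  nlinarith [ha, hb, hc, hcross]

theorem bCol_fix (X0 X1 X2 Y0 Y1 Y2 miny maxy x : Int) (st : List Int × List Int)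
    (hcross : (X1 - X0) * (Y2 - Y0) - (X2 - X0) * (Y1 - Y0) < 0) :
    bCol X0 X1 X2 Y0 Y1 Y2 miny maxy st x = st := by
  rw [bCol_eq, colList_nil x X0 X1 X2 Y0 Y1 Y2 miny maxy hcross]
  simp

theorem aInner_fix (r0 r1 : List Int) (p0 p1 p2 x : Int)
    (hcross : (PySem.List.pyGetD r0 p1 0 - PySem.List.pyGetD r0 p0 0)
        * (PySem.List.pyGetD r1 p2 0 - PySem.List.pyGetD r1 p0 0)
      - (PySem.List.pyGetD r0 p2 0 - PySem.List.pyGetD r0 p0 0)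
        * (PySem.List.pyGetD r1 p1 0 - PySem.List.pyGetD r1 p0 0) < 0) :
    ∀ y : Int, aInner p0 p1 p2 x (r0, r1) y = (r0, r1) := by
  intro y
  simp only [aInner]
  rw [if_neg]
  rintro ⟨ha, hb, hc⟩
  nlinarith [ha, hb, hc, hcross]

-- three coinciding vertices: both versions emit exactly that one pixel
theorem point_eq (r0 r1 : List Int) (p0 p1 p2 : Int)
    (hx1 : PySem.List.pyGetD r0 p1 0 = PySem.List.pyGetD r0 p0 0)
    (hx2 : PySem.List.pyGetD r0 p2 0 = PySem.List.pyGetD r0 p0 0)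
    (hy1 : PySem.List.pyGetD r1 p1 0 = PySem.List.pyGetD r1 p0 0)
    (hy2 : PySem.List.pyGetD r1 p2 0 = PySem.List.pyGetD r1 p0 0) :
    (PySem.List.pyRange
        (min (min (PySem.List.pyGetD r0 p0 0) (PySem.List.pyGetD r0 p1 0)) (PySem.List.pyGetD r0 p2 0))
        (max (max (PySem.List.pyGetD r0 p0 0) (PySem.List.pyGetD r0 p1 0)) (PySem.List.pyGetD r0 p2 0) + 1) 1).foldl
      (fun s x => (PySem.List.pyRange
        (min (min (PySem.List.pyGetD r1 p0 0) (PySem.List.pyGetD r1 p1 0)) (PySem.List.pyGetD r1 p2 0))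
        (max (max (PySem.List.pyGetD r1 p0 0) (PySem.List.pyGetD r1 p1 0)) (PySem.List.pyGetD r1 p2 0) + 1) 1).foldl
          (aInner p0 p1 p2 x) s) (r0, r1)
    = (PySem.List.pyRange
        (min (min (PySem.List.pyGetD r0 p0 0) (PySem.List.pyGetD r0 p1 0)) (PySem.List.pyGetD r0 p2 0))
        (max (max (PySem.List.pyGetD r0 p0 0) (PySem.List.pyGetD r0 p1 0)) (PySem.List.pyGetD r0 p2 0) + 1) 1).foldl
      (bCol (PySem.List.pyGetD r0 p0 0) (PySem.List.pyGetD r0 p1 0) (PySem.List.pyGetD r0 p2 0)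
        (PySem.List.pyGetD r1 p0 0) (PySem.List.pyGetD r1 p1 0) (PySem.List.pyGetD r1 p2 0)
        (min (min (PySem.List.pyGetD r1 p0 0) (PySem.List.pyGetD r1 p1 0)) (PySem.List.pyGetD r1 p2 0))
        (max (max (PySem.List.pyGetD r1 p0 0) (PySem.List.pyGetD r1 p1 0)) (PySem.List.pyGetD r1 p2 0))) (r0, r1) := by
  rw [hx1, hx2, hy1, hy2]
  simp only [min_self, max_self]
  rw [PySem.List.pyRange_one_singleton, PySem.List.pyRange_one_singleton]
  simp only [List.foldl_cons, List.foldl_nil]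
  rw [show aInner p0 p1 p2 (PySem.List.pyGetD r0 p0 0) (r0, r1) (PySem.List.pyGetD r1 p0 0)
      = (r0 ++ [PySem.List.pyGetD r0 p0 0], r1 ++ [PySem.List.pyGetD r1 p0 0]) from by
    simp [aInner, hx1, hx2, hy1, hy2]]
  rw [show bCol (PySem.List.pyGetD r0 p0 0) (PySem.List.pyGetD r0 p0 0) (PySem.List.pyGetD r0 p0 0)
        (PySem.List.pyGetD r1 p0 0) (PySem.List.pyGetD r1 p0 0) (PySem.List.pyGetD r1 p0 0)
        (PySem.List.pyGetD r1 p0 0) (PySem.List.pyGetD r1 p0 0) (r0, r1) (PySem.List.pyGetD r0 p0 0)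
      = (r0 ++ [PySem.List.pyGetD r0 p0 0], r1 ++ [PySem.List.pyGetD r1 p0 0]) from by
    simp [bCol, bEdge, PySem.List.pyRange_one_singleton]]

-- ===== VERDICT (by name: the statement is the Claim_ definition above) =====
theorem barycentric_spec : Claim_equal_barycentric := by
  intro xy points _hdom hpre
  obtain ⟨hxy, hpts, hidx, hcase⟩ := hpre
  have hg0 : PySem.List.pyGetD points 0 0 = points.getD 0 0 := PySem.List.pyGetD_ofNat' points 0 0
  have hg1 : PySem.List.pyGetD points 1 0 = points.getD 1 0 := PySem.List.pyGetD_ofNat' points 1 0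
  have hg2 : PySem.List.pyGetD points 2 0 = points.getD 2 0 := PySem.List.pyGetD_ofNat' points 2 0
  have hr0 : PySem.List.pyGetD xy 0 ([] : List Int) = xy.getD 0 [] := PySem.List.pyGetD_ofNat' xy 0 []
  have hr1 : PySem.List.pyGetD xy 1 ([] : List Int) = xy.getD 1 [] := PySem.List.pyGetD_ofNat' xy 1 []
  show barycentric xy points = barycentric_alt xy points
  simp only [barycentric, barycentric_alt, hg0, hg1, hg2, hr0, hr1]
  rcases hcase with ⟨hn0, hn1, hn2⟩ | ⟨hx1, hx2, hy1, hy2⟩ | hcross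
  · -- all vertex indices non-negative: the column-by-column equivalence
    have H0 := hidx (points.getD 0 0) (by simp)
    have H1 := hidx (points.getD 1 0) (by simp)
    have H2 := hidx (points.getD 2 0) (by simp)
    have hmain := outer_eq (xy.getD 0 []) (xy.getD 1 []) (points.getD 0 0) (points.getD 1 0) (points.getD 2 0)
      hn0 H0.2.1 H0.2.2.2 hn1 H1.2.1 H1.2.2.2 hn2 H2.2.1 H2.2.2.2
      (min (min (PySem.List.pyGetD (xy.getD 1 []) (points.getD 0 0) 0) (PySem.List.pyGetD (xy.getD 1 []) (points.getD 1 0) 0)) (PySem.List.pyGetD (xy.getD 1 []) (points.getD 2 0) 0))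
      (max (max (PySem.List.pyGetD (xy.getD 1 []) (points.getD 0 0) 0) (PySem.List.pyGetD (xy.getD 1 []) (points.getD 1 0) 0)) (PySem.List.pyGetD (xy.getD 1 []) (points.getD 2 0) 0))
      (PySem.List.pyRange
        (min (min (PySem.List.pyGetD (xy.getD 0 []) (points.getD 0 0) 0) (PySem.List.pyGetD (xy.getD 0 []) (points.getD 1 0) 0)) (PySem.List.pyGetD (xy.getD 0 []) (points.getD 2 0) 0))
        (max (max (PySem.List.pyGetD (xy.getD 0 []) (points.getD 0 0) 0) (PySem.List.pyGetD (xy.getD 0 []) (points.getD 1 0) 0)) (PySem.List.pyGetD (xy.getD 0 []) (points.getD 2 0) 0) + 1) 1)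
      [] []
    rw [List.append_nil, List.append_nil] at hmain
    rw [hmain]
  · -- three coinciding vertices: one pixel from each version
    rw [point_eq (xy.getD 0 []) (xy.getD 1 []) (points.getD 0 0) (points.getD 1 0) (points.getD 2 0) hx1 hx2 hy1 hy2]
  · -- strictly clockwise triangle: both versions emit nothing (any in-range indices)
    have hAfold := foldl_fix
      (fun s x => (PySem.List.pyRange
        (min (min (PySem.List.pyGetD (xy.getD 1 []) (points.getD 0 0) 0) (PySem.List.pyGetD (xy.getD 1 []) (points.getD 1 0) 0)) (PySem.List.pyGetD (xy.getD 1 []) (points.getD 2 0) 0))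
        (max (max (PySem.List.pyGetD (xy.getD 1 []) (points.getD 0 0) 0) (PySem.List.pyGetD (xy.getD 1 []) (points.getD 1 0) 0)) (PySem.List.pyGetD (xy.getD 1 []) (points.getD 2 0) 0) + 1) 1).foldl
          (aInner (points.getD 0 0) (points.getD 1 0) (points.getD 2 0) x) s)
      (xy.getD 0 [], xy.getD 1 [])
      (PySem.List.pyRange
        (min (min (PySem.List.pyGetD (xy.getD 0 []) (points.getD 0 0) 0) (PySem.List.pyGetD (xy.getD 0 []) (points.getD 1 0) 0)) (PySem.List.pyGetD (xy.getD 0 []) (points.getD 2 0) 0))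
        (max (max (PySem.List.pyGetD (xy.getD 0 []) (points.getD 0 0) 0) (PySem.List.pyGetD (xy.getD 0 []) (points.getD 1 0) 0)) (PySem.List.pyGetD (xy.getD 0 []) (points.getD 2 0) 0) + 1) 1)
      (fun x _ => foldl_fix _ _ _ (fun y _ =>
        aInner_fix (xy.getD 0 []) (xy.getD 1 []) (points.getD 0 0) (points.getD 1 0) (points.getD 2 0) x hcross y))
    have hBfold := foldl_fix
      (bCol (PySem.List.pyGetD (xy.getD 0 []) (points.getD 0 0) 0) (PySem.List.pyGetD (xy.getD 0 []) (points.getD 1 0) 0)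
        (PySem.List.pyGetD (xy.getD 0 []) (points.getD 2 0) 0) (PySem.List.pyGetD (xy.getD 1 []) (points.getD 0 0) 0)
        (PySem.List.pyGetD (xy.getD 1 []) (points.getD 1 0) 0) (PySem.List.pyGetD (xy.getD 1 []) (points.getD 2 0) 0)
        (min (min (PySem.List.pyGetD (xy.getD 1 []) (points.getD 0 0) 0) (PySem.List.pyGetD (xy.getD 1 []) (points.getD 1 0) 0)) (PySem.List.pyGetD (xy.getD 1 []) (points.getD 2 0) 0))
        (max (max (PySem.List.pyGetD (xy.getD 1 []) (points.getD 0 0) 0) (PySem.List.pyGetD (xy.getD 1 []) (points.getD 1 0) 0)) (PySem.List.pyGetD (xy.getD 1 []) (points.getD 2 0) 0)))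
      (xy.getD 0 [], xy.getD 1 [])
      (PySem.List.pyRange
        (min (min (PySem.List.pyGetD (xy.getD 0 []) (points.getD 0 0) 0) (PySem.List.pyGetD (xy.getD 0 []) (points.getD 1 0) 0)) (PySem.List.pyGetD (xy.getD 0 []) (points.getD 2 0) 0))
        (max (max (PySem.List.pyGetD (xy.getD 0 []) (points.getD 0 0) 0) (PySem.List.pyGetD (xy.getD 0 []) (points.getD 1 0) 0)) (PySem.List.pyGetD (xy.getD 0 []) (points.getD 2 0) 0) + 1) 1)
      (fun x _ => bCol_fix _ _ _ _ _ _ _ _ x _ hcross)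
    rw [hAfold, hBfold]
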